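-- pv_equiv track=rewrite | github.com/di-mooon/tasks_with_codewars | другие задачи/3ку/Alphabetic Anagrams.py | recursive_list_position
-- ===== SOURCE A (Python) =====
-- from math import factorial
--
-- def recursive_list_position(s):
--     if len(s) < 2: return 0
--     lst = sorted(s[:])
--     a = 1
--     for i, j in enumerate(lst):
--         n = 1
--         while i + n < len(lst) and lst[i + n] == j:
--             n += 1
--         a *= n
--     position = lst.index(s[0])
--     return factorial(len(s) - 1) * position // a + recursive_list_position(s[1:])
-- ===== SOURCE B (Python) =====
-- from math import factorial
--
-- def recursive_list_position(s):
--     # One pass: character counts + incremental factorial denominator,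
--     # no recursion, no per-suffix sorting.
--     counts = {}
--     for ch in s:
--         counts[ch] = counts.get(ch, 0) + 1
--     denom = 1
--     for k in counts.values():
--         denom *= factorial(k)
--     rank = 0
--     rem = len(s)
--     for ch in s:
--         rem -= 1
--         smaller = sum(v for c, v in counts.items() if c < ch)
--         rank += factorial(rem) * smaller // denom
--         denom //= counts[ch]
--         counts[ch] -= 1
--         if counts[ch] == 0:
--             del counts[ch]
--     return rank
-- ===== Notes on version B (the rewrite author's own statement) =====
-- stated objective: faster
-- what changed: Replaces A's recursion over suffixes (each re-sorting the suffix, scanning runs with a nested while, and list.index) by a single left-to-right pass that maintains a character-count dict and an incrementally updated product of factorials (the permutation denominator), with one precomputed pass for the initial counts.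
import Mathlib
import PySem

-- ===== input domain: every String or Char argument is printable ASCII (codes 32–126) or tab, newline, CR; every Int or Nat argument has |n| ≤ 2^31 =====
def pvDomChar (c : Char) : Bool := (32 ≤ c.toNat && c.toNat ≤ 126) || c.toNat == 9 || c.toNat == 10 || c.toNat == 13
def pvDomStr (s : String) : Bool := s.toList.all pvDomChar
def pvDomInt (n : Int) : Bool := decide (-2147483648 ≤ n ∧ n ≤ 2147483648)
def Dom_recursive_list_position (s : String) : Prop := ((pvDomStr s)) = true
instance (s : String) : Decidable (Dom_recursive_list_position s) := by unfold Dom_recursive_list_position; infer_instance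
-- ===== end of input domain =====

-- B replaces A's per-suffix sort + run-scan recursion by a single pass with a
-- character-count dict and an incrementally maintained factorial denominator (return value only).

-- ===== PORT A =====
-- 'while i + n < len(lst) and lst[i + n] == j: n += 1'
def pvAWhile (lst : List Char) (i : Nat) (j : Char) (n : Nat) : Nat :=
  if h : i + n < lst.length then
    if lst[i + n] == j then pvAWhile lst i j (n + 1) else n
  else n
termination_by lst.length - (i + n)

-- A's body over the string's character list (Python recursion on s[1:] = recursion on the tail);
-- enumerate indices are ≥ 0, so .toNat on them is exact
def pvACore : List Char → Int
  | [] => 0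
  | c :: rest =>
    if (c :: rest).length < 2 then 0
    else
      let lst := PySem.List.sorted (c :: rest) (fun x => x) false
      let a : Nat := (PySem.List.enumerate lst).foldl (fun acc p => acc * pvAWhile lst p.1.toNat p.2 1) 1
      -- lst.index(s[0]): exact here, since s[0] ∈ lst makes index? = some
      let position : Nat := (PySem.List.index? lst c).getD 0
      PySem.Int.floordiv ((Nat.factorial ((c :: rest).length - 1) : Int) * (position : Int)) (a : Int)
        + pvACore rest

def recursive_list_position (s : String) : Int := pvACore s.toList

-- ===== PORT B =====
-- body of B's main 'for ch in s' loop, state (rank, rem, denom, counts)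
def pvBStep (st : Int × Int × Int × PySem.Dict Char Int) (ch : Char) :
    Int × Int × Int × PySem.Dict Char Int :=
  let rank := st.1
  let rem := st.2.1 - 1
  let denom := st.2.2.1
  let counts := st.2.2.2
  let smaller : Int := ((counts.items.filter (fun p => decide (p.1 < ch))).map (fun p => p.2)).sum
  let rank := rank + PySem.Int.floordiv ((Nat.factorial rem.toNat : Int) * smaller) denom
  let denom := PySem.Int.floordiv denom (counts.getD ch 0)
  let cnew := counts.getD ch 0 - 1
  let counts := counts.insert ch cnew
  let counts := if cnew == 0 then counts.erase ch else counts
  (rank, rem, denom, counts)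

def recursive_list_position_alt (s : String) : Int :=
  let counts0 : PySem.Dict Char Int :=
    s.toList.foldl (fun d ch => d.insert ch (d.getD ch 0 + 1)) PySem.Dict.empty
  -- factorial(k) on a dict value (a count, always ≥ 0)
  let denom0 : Int := counts0.values.foldl (fun acc k => acc * (Nat.factorial k.toNat : Int)) 1
  (s.toList.foldl pvBStep (0, (s.toList.length : Int), denom0, counts0)).1

-- ===== PRECONDITION & SPEC =====
def Spec_recursive_list_position (s : String) (out : Int) : Prop := out = recursive_list_position_alt s
instance (s : String) (out : Int) : Decidable (Spec_recursive_list_position s out) := by unfold Spec_recursive_list_position; infer_instance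

-- ===== CLAIM (what is proved, stated in full; the proofs are below) =====
def Claim_equal_recursive_list_position : Prop := ∀ (s : String), Dom_recursive_list_position s → Spec_recursive_list_position s (recursive_list_position s)

-- ===== LEMMAS AND PROOFS =====

-- ∏ over the distinct chars of (multiplicity)!, in head-recursive form
def pvP : List Char → Nat
  | [] => 1
  | x :: t => (t.count x + 1) * pvP t

-- the common mathematical value: 0-based rank of the word among its sorted anagrams
def pvR : List Char → Nat
  | [] => 0
  | c :: rest =>
    Nat.factorial rest.length * ((c :: rest).countP (fun x => decide (x < c))) / pvP (c :: rest)
      + pvR rest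

lemma pvAWhile_spec (lst : List Char) (j : Char) :
    ∀ i n, pvAWhile lst i j n = n + ((lst.drop (i + n)).takeWhile (fun x => x == j)).length := by
  suffices H : ∀ k i n, lst.length - (i + n) ≤ k →
      pvAWhile lst i j n = n + ((lst.drop (i + n)).takeWhile (fun x => x == j)).length from
    fun i n => H (lst.length - (i + n)) i n le_rfl
  intro k
  induction k with
  | zero =>
    intro i n hk
    have hge : lst.length ≤ i + n := by omega
    rw [pvAWhile, dif_neg (by omega), List.drop_eq_nil_of_le hge]
    simp
  | succ k ih =>
    intro i n hk
    rw [pvAWhile]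
    by_cases h : i + n < lst.length
    · rw [dif_pos h, List.drop_eq_getElem_cons h]
      by_cases hj : lst[i + n] = j
      · rw [if_pos (by simpa using hj)]
        have ihh := ih i (n + 1) (by omega)
        rw [show i + (n + 1) = i + n + 1 from rfl] at ihh
        rw [ihh]
        simp [hj]
        omega
      · rw [if_neg (by simpa using hj)]
        simp [hj]
    · rw [dif_neg h, List.drop_eq_nil_of_le (by omega)]
      simp

lemma pvTakeWhile_count (x : Char) (t : List Char) (hpw : t.Pairwise (· ≤ ·))
    (h : ∀ y ∈ t, x ≤ y) :
    (t.takeWhile (fun y => y == x)).length = t.count x := by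
  induction t with
  | nil => simp
  | cons y t ih =>
    rw [List.pairwise_cons] at hpw
    by_cases hy : y = x
    · subst hy
      simp [ih hpw.2 hpw.1]
    · have hxy : x < y := lt_of_le_of_ne (h y List.mem_cons_self) (fun e => hy e.symm)
      have hnot : x ∉ t := by
        intro hx
        exact absurd (hpw.1 x hx) (not_le.mpr hxy)
      have hcount : t.count x = 0 := List.count_eq_zero.mpr hnot
      simp [hy, hcount]

lemma pvFoldl_mul {α M : Type} [CommMonoid M] (l : List α) (f : α → M) (c : M) :
    l.foldl (fun a x => a * f x) c = c * (l.map f).prod := by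
  induction l generalizing c with
  | nil => simp
  | cons a l ih => simp [ih, mul_assoc]

lemma pvP_perm {l l' : List Char} (h : l.Perm l') : pvP l = pvP l' := by
  induction h with
  | nil => rfl
  | cons x h ih => simp [pvP, ih, h.count_eq]
  | swap x y l =>
    by_cases hxy : x = y
    · subst hxy; rfl
    · have hyx : ¬ y = x := fun e => hxy e.symm
      have h1 : (y :: l).count x = l.count x := by
        simp [hyx]
      have h2 : (x :: l).count y = l.count y := by
        simp [hxy]
      simp only [pvP, h1, h2]
      ring
  | trans _ _ ih1 ih2 => exact ih1.trans ih2

lemma pvEnum_shift {α : Type} (t : List α) (s : Int) :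
    PySem.List.enumerate t (s + 1) = (PySem.List.enumerate t s).map (fun p => (p.1 + 1, p.2)) := by
  induction t generalizing s with
  | nil => simp [PySem.List.enumerate_nil]
  | cons a t ih =>
    rw [PySem.List.enumerate_cons, PySem.List.enumerate_cons, List.map_cons, ih]

lemma pvEnum_le {α : Type} (t : List α) : ∀ (s : Int), ∀ p ∈ PySem.List.enumerate t s, s ≤ p.1 := by
  induction t with
  | nil => intro s p hp; simp [PySem.List.enumerate_nil] at hp
  | cons a t ih =>
    intro s p hp
    rw [PySem.List.enumerate_cons, List.mem_cons] at hp
    rcases hp with hp | hp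
    · simp [hp]
    · have := ih (s + 1) p hp
      omega

lemma pvAWhile_cons_shift (x : Char) (t : List Char) (i : Nat) (j : Char) :
    pvAWhile (x :: t) (i + 1) j 1 = pvAWhile t i j 1 := by
  rw [pvAWhile_spec, pvAWhile_spec]
  rw [show (x :: t).drop (i + 1 + 1) = t.drop (i + 1) from List.drop_succ_cons ..]

lemma pvAProdAux : ∀ (m : List Char), m.Pairwise (· ≤ ·) →
    ((PySem.List.enumerate m 0).map (fun p => pvAWhile m p.1.toNat p.2 1)).prod = pvP m
  | [], _ => by simp [PySem.List.enumerate_nil, pvP]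
  | x :: t, h => by
    rw [List.pairwise_cons] at h
    rw [PySem.List.enumerate_cons, List.map_cons, List.prod_cons]
    have hhead : pvAWhile (x :: t) ((0 : Int)).toNat x 1 = 1 + t.count x := by
      rw [show ((0 : Int)).toNat = 0 from rfl, pvAWhile_spec]
      rw [show (x :: t).drop (0 + 1) = t from rfl]
      rw [pvTakeWhile_count x t h.2 h.1]
    have htail : (PySem.List.enumerate t (0 + 1)).map
          (fun p => pvAWhile (x :: t) p.1.toNat p.2 1)
        = (PySem.List.enumerate t 0).map (fun p => pvAWhile t p.1.toNat p.2 1) := by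
      rw [pvEnum_shift t 0, List.map_map]
      apply List.map_congr_left
      intro p hp
      have hp0 : 0 ≤ p.1 := pvEnum_le t 0 p hp
      simp only [Function.comp_def]
      rw [show (p.1 + 1).toNat = p.1.toNat + 1 by omega]
      exact pvAWhile_cons_shift x t p.1.toNat p.2
    rw [hhead, htail, pvAProdAux t h.2]
    show (1 + t.count x) * pvP t = (t.count x + 1) * pvP t
    ring

lemma pvAProd_sorted (m : List Char) (h : m.Pairwise (· ≤ ·)) :
    (PySem.List.enumerate m).foldl (fun acc p => acc * pvAWhile m p.1.toNat p.2 1) 1 = pvP m := by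
  rw [pvFoldl_mul, one_mul]
  exact pvAProdAux m h

lemma pvIndex_sorted (m : List Char) (c : Char) (h : m.Pairwise (· ≤ ·)) (hc : c ∈ m) :
    PySem.List.index? m c = some (m.countP (fun x => decide (x < c))) := by
  induction m with
  | nil => cases hc
  | cons x t ih =>
    rw [List.pairwise_cons] at h
    by_cases hx : x = c
    · subst hx
      have h0 : t.countP (fun y => decide (y < x)) = 0 := by
        apply List.countP_eq_zero.mpr
        intro y hy
        simpa using not_lt.mpr (h.1 y hy)
      simp [PySem.List.index?, List.idxOf?_cons, h0]
    · have hct : c ∈ t := by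
        rw [List.mem_cons] at hc
        rcases hc with hc | hc
        · exact absurd hc.symm hx
        · exact hc
      have hxc : x < c := lt_of_le_of_ne (h.1 c hct) hx
      have hrec := ih h.2 hct
      simp only [PySem.List.index?] at hrec ⊢
      rw [List.idxOf?_cons]
      have hbx : (x == c) = false := by simp [hx]
      rw [hbx]
      simp only [Bool.false_eq_true, if_false, hrec, Option.map_some]
      simp [hxc, Nat.add_comm]

lemma pvA_eq_R : ∀ (l : List Char), pvACore l = (pvR l : Int)
  | [] => by simp [pvACore, pvR]
  | [c] => by simp [pvACore, pvR, pvP]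
  | c :: b :: rest' => by
    have hlen : ¬ ((c :: b :: rest').length < 2) := by simp
    rw [pvACore, if_neg hlen]
    have hperm := PySem.List.sorted_perm (c :: b :: rest') (fun x => x) false
    have hpw := PySem.List.sorted_pairwise (c :: b :: rest') (fun x => x)
    have hc : c ∈ PySem.List.sorted (c :: b :: rest') (fun x => x) false :=
      hperm.mem_iff.mpr List.mem_cons_self
    show PySem.Int.floordiv
        ((Nat.factorial ((c :: b :: rest').length - 1) : Int)
          * (((PySem.List.index? (PySem.List.sorted (c :: b :: rest') (fun x => x) false) c).getD 0 : Nat) : Int))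
        ((((PySem.List.enumerate (PySem.List.sorted (c :: b :: rest') (fun x => x) false)).foldl
            (fun acc p => acc * pvAWhile (PySem.List.sorted (c :: b :: rest') (fun x => x) false) p.1.toNat p.2 1) 1 : Nat) : Int))
      + pvACore (b :: rest') = ((pvR (c :: b :: rest') : Nat) : Int)
    rw [pvAProd_sorted _ hpw, pvIndex_sorted _ c hpw hc]
    rw [pvP_perm hperm, hperm.countP_eq]
    simp only [Option.getD_some]
    rw [show (c :: b :: rest').length - 1 = (b :: rest').length by simp]
    rw [← Nat.cast_mul, PySem.Int.floordiv_natCast, pvA_eq_R (b :: rest')]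
    rw [show pvR (c :: b :: rest')
          = Nat.factorial (b :: rest').length
              * ((c :: b :: rest').countP (fun x => decide (x < c))) / pvP (c :: b :: rest')
            + pvR (b :: rest') from rfl]
    push_cast
    ring

-- ---- B side ----

lemma pvMem_erase_ne {K : List Char} (hnd : K.Nodup) {k x : Char} (hk : k ∈ K.erase x) : k ≠ x :=
  ((List.Nodup.mem_erase_iff hnd).mp hk).1

lemma pvProd_fact_count : ∀ (l K : List Char), K.Nodup → (∀ x ∈ l, x ∈ K) →
    (K.map (fun k => (l.count k).factorial)).prod = pvP l
  | [], K, _, _ => by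
    have h1 : ∀ y ∈ K.map (fun k => (List.count k ([] : List Char)).factorial), y = 1 := by
      intro y hy
      rcases List.mem_map.mp hy with ⟨k, _, rfl⟩
      simp
    rw [List.prod_eq_one h1]; rfl
  | x :: t, K, hnd, hsup => by
    have hxK : x ∈ K := hsup x List.mem_cons_self
    have hperm : K.Perm (x :: K.erase x) := List.perm_cons_erase hxK
    have hL : (K.map (fun k => ((x :: t).count k).factorial)).prod
        = ((x :: t).count x).factorial * ((K.erase x).map (fun k => (t.count k).factorial)).prod := by
      rw [(hperm.map (fun k => ((x :: t).count k).factorial)).prod_eq]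
      rw [List.map_cons, List.prod_cons]
      congr 1
      refine congrArg List.prod (List.map_congr_left ?_)
      intro k hk
      have hxk : ¬ (x = k) := fun e => pvMem_erase_ne hnd hk e.symm
      simp [hxk]
    have hR : (K.map (fun k => (t.count k).factorial)).prod
        = (t.count x).factorial * ((K.erase x).map (fun k => (t.count k).factorial)).prod := by
      rw [(hperm.map (fun k => (t.count k).factorial)).prod_eq]
      rw [List.map_cons, List.prod_cons]
    have hsup' : ∀ y ∈ t, y ∈ K := fun y hy => hsup y (List.mem_cons_of_mem _ hy)
    have hKt := pvProd_fact_count t K hnd hsup'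
    rw [hR] at hKt
    rw [hL, show (x :: t).count x = t.count x + 1 by simp, Nat.factorial_succ]
    rw [show pvP (x :: t) = (t.count x + 1) * pvP t from rfl, ← hKt]
    ring

lemma pvSum_count_filter (c : Char) : ∀ (l K : List Char), K.Nodup → (∀ x ∈ l, x ∈ K) →
    ((K.filter (fun k => decide (k < c))).map (fun k => l.count k)).sum
      = l.countP (fun x => decide (x < c))
  | [], K, _, _ => by
    have h1 : ∀ y ∈ (K.filter (fun k => decide (k < c))).map
        (fun k => List.count k ([] : List Char)), y = 0 := by
      intro y hy
      rcases List.mem_map.mp hy with ⟨k, _, rfl⟩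
      simp
    rw [List.sum_eq_zero h1]; rfl
  | x :: t, K, hnd, hsup => by
    have hsup' : ∀ y ∈ t, y ∈ K := fun y hy => hsup y (List.mem_cons_of_mem _ hy)
    have hx : x ∈ K := hsup x List.mem_cons_self
    have hndf : (K.filter (fun k => decide (k < c))).Nodup := hnd.filter _
    have hiht := pvSum_count_filter c t K hnd hsup'
    by_cases hxc : x < c
    · have hxf : x ∈ K.filter (fun k => decide (k < c)) :=
        List.mem_filter.mpr ⟨hx, by simpa using hxc⟩
      have hperm : (K.filter (fun k => decide (k < c))).Perm
          (x :: (K.filter (fun k => decide (k < c))).erase x) := List.perm_cons_erase hxf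
      have hL : ((K.filter (fun k => decide (k < c))).map (fun k => (x :: t).count k)).sum
          = (x :: t).count x
            + (((K.filter (fun k => decide (k < c))).erase x).map (fun k => t.count k)).sum := by
        rw [(hperm.map (fun k => (x :: t).count k)).sum_eq]
        rw [List.map_cons, List.sum_cons]
        congr 1
        refine congrArg List.sum (List.map_congr_left ?_)
        intro k hk
        have hxk : ¬ (x = k) := fun e => pvMem_erase_ne hndf hk e.symm
        simp [hxk]
      have hRr : ((K.filter (fun k => decide (k < c))).map (fun k => t.count k)).sum
          = t.count x
            + (((K.filter (fun k => decide (k < c))).erase x).map (fun k => t.count k)).sum := by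
        rw [(hperm.map (fun k => t.count k)).sum_eq, List.map_cons, List.sum_cons]
      rw [hRr] at hiht
      rw [hL, List.countP_cons]
      have hcx : (x :: t).count x = t.count x + 1 := by simp
      simp only [hxc, decide_true, if_true]
      omega
    · have hcong : ((K.filter (fun k => decide (k < c))).map (fun k => (x :: t).count k))
          = ((K.filter (fun k => decide (k < c))).map (fun k => t.count k)) := by
        apply List.map_congr_left
        intro k hk
        have hkc : k < c := by simpa using (List.mem_filter.mp hk).2
        have hxk : ¬ (x = k) := fun e => hxc (e ▸ hkc)
        simp [hxk]
      rw [hcong, hiht, List.countP_cons]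
      simp [hxc]

-- dict-erase facts (PySem has no erase lemmas; proved here from the Dict structure)
lemma pvFind_filter {κ ν : Type} [BEq κ] [LawfulBEq κ] [DecidableEq κ] (k k' : κ)
    (items : List (κ × ν)) :
    (items.filter (fun p => !(p.1 == k))).find? (fun p => p.1 == k')
      = if k' = k then none else items.find? (fun p => p.1 == k') := by
  induction items with
  | nil => simp
  | cons p items ih =>
    rw [List.filter_cons]
    by_cases hpk : p.1 = k
    · rw [if_neg (by simp [hpk]), ih]
      by_cases hk' : k' = k
      · rw [if_pos hk', if_pos hk']
      · rw [if_neg hk', if_neg hk', List.find?_cons_of_neg]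
        simp only [hpk, beq_iff_eq]
        exact fun e => hk' e.symm
    · rw [if_pos (by simp [hpk])]
      by_cases hpk' : p.1 = k'
      · have hk'k : ¬ k' = k := fun e => hpk (hpk'.trans e)
        rw [List.find?_cons_of_pos, if_neg hk'k, List.find?_cons_of_pos] <;> simp [hpk']
      · rw [List.find?_cons_of_neg, ih]
        · by_cases hk' : k' = k
          · rw [if_pos hk', if_pos hk']
          · rw [if_neg hk', if_neg hk', List.find?_cons_of_neg]
            simp [hpk']
        · simp [hpk']

lemma pvDict_get?_erase {κ ν : Type} [BEq κ] [LawfulBEq κ] [DecidableEq κ] (d : PySem.Dict κ ν) (k k' : κ) :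
    (d.erase k).get? k' = if k' = k then none else d.get? k' := by
  obtain ⟨items⟩ := d
  simp only [PySem.Dict.erase, PySem.Dict.get?, pvFind_filter]
  split_ifs <;> simp

lemma pvDict_getD_erase_self {κ ν : Type} [BEq κ] [LawfulBEq κ] [DecidableEq κ] (d : PySem.Dict κ ν) (k : κ)
    (d0 : ν) : (d.erase k).getD k d0 = d0 := by
  simp [PySem.Dict.getD, pvDict_get?_erase]

lemma pvDict_getD_erase_ne {κ ν : Type} [BEq κ] [LawfulBEq κ] [DecidableEq κ] (d : PySem.Dict κ ν) {k k' : κ}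
    (h : k' ≠ k) (d0 : ν) : (d.erase k).getD k' d0 = d.getD k' d0 := by
  simp [PySem.Dict.getD, pvDict_get?_erase, h]

lemma pvDict_keys_erase {κ ν : Type} [BEq κ] (d : PySem.Dict κ ν) (k : κ) :
    (d.erase k).keys = d.keys.filter (fun x => !(x == k)) := by
  obtain ⟨items⟩ := d
  simp only [PySem.Dict.erase, PySem.Dict.keys, List.filter_map]
  rfl

lemma pvDict_mem_keys_erase {κ ν : Type} [BEq κ] [LawfulBEq κ] (d : PySem.Dict κ ν) {k k' : κ}
    (h : k' ≠ k) (hm : k' ∈ d.keys) : k' ∈ (d.erase k).keys := by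
  rw [pvDict_keys_erase]
  exact List.mem_filter.mpr ⟨hm, by simp [h]⟩

lemma pvDict_nodup_keys_erase {κ ν : Type} [BEq κ] (d : PySem.Dict κ ν) (k : κ)
    (h : d.keys.Nodup) : (d.erase k).keys.Nodup := by
  rw [pvDict_keys_erase]
  exact h.filter _

-- loop invariant: counts is exactly the multiset of the remaining suffix
def pvInv (d : PySem.Dict Char Int) (suf : List Char) : Prop :=
  d.keys.Nodup ∧ (∀ ch, d.getD ch 0 = (suf.count ch : Int)) ∧ (∀ ch ∈ suf, ch ∈ d.keys)

lemma pvBLoop : ∀ (suf : List Char) (r : Int) (d : PySem.Dict Char Int), pvInv d suf →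
    (suf.foldl pvBStep (r, (suf.length : Int), (pvP suf : Int), d)).1 = r + (pvR suf : Int)
  | [], r, d, _ => by simp [pvR]
  | ch :: rest, r, d, hInv => by
    obtain ⟨hnd, hget, hsup⟩ := hInv
    have hcnt : d.getD ch 0 = ((rest.count ch + 1 : Nat) : Int) := by
      rw [hget ch]; simp
    have hsm : ((d.items.filter (fun p => decide (p.1 < ch))).map (fun p => p.2)).sum
        = (((ch :: rest).countP (fun x => decide (x < ch)) : Nat) : Int) := by
      rw [PySem.Dict.items_eq_map_keys d hnd 0, List.filter_map, List.map_map]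
      simp only [Function.comp_def]
      rw [List.map_congr_left (fun k _ => hget k)]
      rw [show (fun k => (((ch :: rest).count k : Nat) : Int))
            = (Nat.cast ∘ fun k => (ch :: rest).count k) from rfl]
      rw [← List.map_map, ← Nat.cast_list_sum]
      rw [pvSum_count_filter ch (ch :: rest) d.keys hnd hsup]
    rw [List.foldl_cons]
    dsimp only [pvBStep]
    have hrem : ((ch :: rest).length : Int) - 1 = (rest.length : Int) := by
      simp [List.length_cons]
    rw [hsm, hrem, Int.toNat_natCast, ← Nat.cast_mul, PySem.Int.floordiv_natCast]
    rw [hcnt, PySem.Int.floordiv_natCast]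
    have hdiv : pvP (ch :: rest) / (rest.count ch + 1) = pvP rest := by
      rw [show pvP (ch :: rest) = (rest.count ch + 1) * pvP rest from rfl]
      exact Nat.mul_div_cancel_left _ (Nat.succ_pos _)
    rw [hdiv]
    have hcnew : ((rest.count ch + 1 : Nat) : Int) - 1 = ((rest.count ch : Nat) : Int) := by
      push_cast; ring
    rw [hcnew]
    by_cases hz : rest.count ch = 0
    · rw [if_pos (by simp [hz])]
      have hinv' : pvInv ((d.insert ch ((rest.count ch : Nat) : Int)).erase ch) rest := by
        refine ⟨?_, ?_, ?_⟩
        · exact pvDict_nodup_keys_erase _ _ (PySem.Dict.nodup_keys_insert d ch _ hnd)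
        · intro ch'
          by_cases h' : ch' = ch
          · subst h'
            rw [pvDict_getD_erase_self]
            simp [hz]
          · rw [pvDict_getD_erase_ne _ h', PySem.Dict.getD_insert, if_neg h', hget ch']
            have hcc : ¬ (ch = ch') := fun e => h' e.symm
            simp [hcc]
        · intro ch' hm
          have h' : ch' ≠ ch := by
            intro e
            have h1 : 0 < rest.count ch' := List.count_pos_iff.mpr hm
            rw [e] at h1; omega
          exact pvDict_mem_keys_erase _ h'
            ((PySem.Dict.mem_keys_insert d ch ch' _).mpr
              (Or.inr (hsup ch' (List.mem_cons_of_mem _ hm))))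
      rw [pvBLoop rest _ _ hinv']
      rw [show pvR (ch :: rest)
            = Nat.factorial rest.length * ((ch :: rest).countP (fun x => decide (x < ch)))
                / pvP (ch :: rest) + pvR rest from rfl]
      push_cast
      ring
    · rw [if_neg (by simp [hz])]
      have hinv' : pvInv (d.insert ch ((rest.count ch : Nat) : Int)) rest := by
        refine ⟨PySem.Dict.nodup_keys_insert d ch _ hnd, ?_, ?_⟩
        · intro ch'
          rw [PySem.Dict.getD_insert]
          by_cases h' : ch' = ch
          · subst h'; rw [if_pos rfl]
          · rw [if_neg h', hget ch']
            have hcc : ¬ (ch = ch') := fun e => h' e.symm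
            simp [hcc]
        · intro ch' hm
          rcases eq_or_ne ch' ch with h' | h'
          · exact (PySem.Dict.mem_keys_insert d ch ch' _).mpr (Or.inl h')
          · exact (PySem.Dict.mem_keys_insert d ch ch' _).mpr
              (Or.inr (hsup ch' (List.mem_cons_of_mem _ hm)))
      rw [pvBLoop rest _ _ hinv']
      rw [show pvR (ch :: rest)
            = Nat.factorial rest.length * ((ch :: rest).countP (fun x => decide (x < ch)))
                / pvP (ch :: rest) + pvR rest from rfl]
      push_cast
      ring

lemma pvB_eq_R (s : String) : recursive_list_position_alt s = (pvR s.toList : Int) := by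
  simp only [recursive_list_position_alt]
  set l := s.toList with hl
  set c0 : PySem.Dict Char Int :=
    l.foldl (fun d ch => d.insert ch (d.getD ch 0 + 1)) PySem.Dict.empty with hc0
  have hkeys : c0.keys = PySem.Set.ofList l := by
    rw [hc0, PySem.Dict.keys_foldl_insert, PySem.Dict.keys_empty]
    rfl
  have hnd : c0.keys.Nodup := by
    rw [hkeys]; exact PySem.Set.nodup_ofList l
  have hget : ∀ ch, c0.getD ch 0 = (l.count ch : Int) := by
    intro ch
    rw [hc0]
    have h1 := PySem.Dict.getD_foldl_insert_add_one l PySem.Dict.empty ch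
    simpa [PySem.Dict.getD_empty] using h1
  have hsup : ∀ ch ∈ l, ch ∈ c0.keys := by
    intro ch hch
    rw [hkeys]
    exact (PySem.Set.mem_ofList l ch).mpr hch
  have hden : c0.values.foldl (fun acc k => acc * (Nat.factorial k.toNat : Int)) 1
      = (pvP l : Int) := by
    rw [PySem.Dict.values_eq_map_keys c0 hnd 0, pvFoldl_mul, one_mul, List.map_map]
    have h1 : ∀ k ∈ c0.keys,
        ((fun k => (Nat.factorial (c0.getD k 0).toNat : Int)) ∘ id) k
          = ((Nat.cast ∘ fun k => (l.count k).factorial) k) := by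
      intro k _
      simp [hget k, Int.toNat_natCast]
    rw [List.map_congr_left (fun k hk => by
      show (Nat.factorial ((c0.getD k 0)).toNat : Int) = ((Nat.cast ∘ fun k => (l.count k).factorial) k)
      simp [hget k, Int.toNat_natCast])]
    rw [← List.map_map, ← Nat.cast_list_prod]
    rw [pvProd_fact_count l c0.keys hnd hsup]
  rw [hden, pvBLoop l 0 c0 ⟨hnd, hget, hsup⟩]
  simp

-- ===== VERDICT (by name: the statement is the Claim_ definition above) =====
theorem recursive_list_position_spec : Claim_equal_recursive_list_position := by
  intro s _
  unfold Spec_recursive_list_position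
  rw [pvB_eq_R]
  show pvACore s.toList = _
  exact pvA_eq_R s.toList
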